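-- pv_equiv track=rewrite | github.com/Pinguteca/codember | 2024/00/Python/main.py | unlock_terminal
-- ===== SOURCE A (Python) =====
-- def unlock_terminal(initial_state: str, moves: str) -> int:
--     shift: int = 0
--     state = list(map(int, list(initial_state)))
--     for m in moves:
--         if m == "U":
--             # No need to readjust shift due to Python allowing negative indexing
--             # Other languages would just use shift % len(moves) to readjust it
--             state[shift] = (state[shift] + 1) % 10
--         elif m == "D":
--             state[shift] = (state[shift] - 1) % 10
--         elif m == "L":
--             shift -= 1
--         elif m == "R":
--             shift += 1
--     return int("".join([str(i) for i in state]))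
-- ===== SOURCE B (Python) =====
-- def unlock_terminal(initial_state: str, moves: str) -> int:
--     # Two-pass: first build a net-delta table per wheel position (navigation only),
--     # then apply all deltas to the digits in one vectorized pass.
--     n = len(initial_state)
--     deltas = [0] * n
--     shift = 0
--     for m in moves:
--         if m == "L":
--             shift -= 1
--         elif m == "R":
--             shift += 1
--         elif m == "U":
--             deltas[shift % n] += 1
--         elif m == "D":
--             deltas[shift % n] -= 1
--     digits = [(int(c) + d) % 10 for c, d in zip(initial_state, deltas)]
--     return int("".join(str(x) for x in digits))
-- ===== Notes on version B (the rewrite author's own statement) =====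
-- stated objective: alternative
-- what changed: B separates navigation from mutation: one pass builds a net-delta table indexed by shift % n, then a second vectorized pass applies each delta to its digit mod 10, instead of A's single pass mutating the digit list in place at every U/D.
import Mathlib
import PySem

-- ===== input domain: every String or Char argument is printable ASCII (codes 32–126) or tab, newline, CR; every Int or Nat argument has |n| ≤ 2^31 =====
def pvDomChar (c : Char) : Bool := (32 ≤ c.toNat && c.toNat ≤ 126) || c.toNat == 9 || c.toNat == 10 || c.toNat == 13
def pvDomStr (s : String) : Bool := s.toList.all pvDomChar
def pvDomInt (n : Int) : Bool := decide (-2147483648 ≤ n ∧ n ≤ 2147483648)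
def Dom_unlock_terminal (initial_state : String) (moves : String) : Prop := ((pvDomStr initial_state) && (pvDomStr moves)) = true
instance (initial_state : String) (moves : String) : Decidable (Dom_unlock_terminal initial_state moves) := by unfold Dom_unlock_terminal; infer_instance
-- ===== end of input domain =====

-- B replaces A's single inline-mutating simulation pass by a navigation pass that builds a
-- per-position net-delta table, followed by a vectorized pass applying the deltas mod 10.

-- int(c) for a one-character string; the `.getD 0` default is only reached where Python
-- raises ValueError, which Pre_ excludes.
def pvIntOf (c : Char) : Int := (PySem.Int.ofChars? [c]).getD 0

-- int("".join(str(i) for i in st)); the `.getD 0` default is unreachable under Pre_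
-- (the digit list is nonempty and all entries are in 0..9).
def pvOut (st : List Int) : Int :=
  (PySem.Int.ofChars? (PySem.Chars.join [] (st.map PySem.Int.toChars))).getD 0

-- ===== PORT A =====
-- A's for-loop over moves carrying (shift, state); state[shift] via Python indexing
-- (the pyGetD/pySetD defaults are only reached where Python raises IndexError, excluded by Pre_)
def pvALoop : List Char → Int → List Int → List Int
  | [], _, st => st
  | m :: ms, shift, st =>
    if m = 'U' then
      pvALoop ms shift (PySem.List.pySetD st shift (PySem.Int.mod (PySem.List.pyGetD st shift 0 + 1) 10))
    else if m = 'D' then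
      pvALoop ms shift (PySem.List.pySetD st shift (PySem.Int.mod (PySem.List.pyGetD st shift 0 - 1) 10))
    else if m = 'L' then pvALoop ms (shift - 1) st
    else if m = 'R' then pvALoop ms (shift + 1) st
    else pvALoop ms shift st

def unlock_terminal (initial_state : String) (moves : String) : Int :=
  pvOut (pvALoop moves.toList 0 (initial_state.toList.map pvIntOf))

-- ===== PORT B =====
-- B's navigation loop: L/R move the cursor, U/D bump deltas[shift % n]
-- (PySem.Int.mod shift n is shift % n; Python's ZeroDivisionError at n = 0 is excluded by Pre_)
def pvBLoop (n : Int) : List Char → Int → List Int → List Int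
  | [], _, ds => ds
  | m :: ms, shift, ds =>
    if m = 'L' then pvBLoop n ms (shift - 1) ds
    else if m = 'R' then pvBLoop n ms (shift + 1) ds
    else if m = 'U' then
      pvBLoop n ms shift (PySem.List.pySetD ds (PySem.Int.mod shift n) (PySem.List.pyGetD ds (PySem.Int.mod shift n) 0 + 1))
    else if m = 'D' then
      pvBLoop n ms shift (PySem.List.pySetD ds (PySem.Int.mod shift n) (PySem.List.pyGetD ds (PySem.Int.mod shift n) 0 - 1))
    else pvBLoop n ms shift ds

def unlock_terminal_alt (initial_state : String) (moves : String) : Int :=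
  let cs := initial_state.toList
  let ds := pvBLoop (cs.length : Int) moves.toList 0 (List.replicate cs.length 0)
  pvOut ((cs.zip ds).map (fun p => PySem.Int.mod (pvIntOf p.1 + p.2) 10))

-- ===== PRECONDITION & SPEC =====
-- c is an ASCII digit '0'..'9' (what int() accepts on a single character)
def pvIsDigit (c : Char) : Bool := 48 ≤ c.toNat && c.toNat ≤ 57

-- the cursor stays inside Python's index range [-n, n) at every U/D move
-- (b = cursor position so far; checks only navigation bounds, computes no output)
def pvMovesOk (n : Int) : List Char → Int → Bool
  | [], _ => true
  | m :: ms, b =>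
    (if m = 'U' ∨ m = 'D' then decide (-n ≤ b ∧ b < n) else true) &&
    pvMovesOk n ms (b + (if m = 'R' then 1 else 0) - (if m = 'L' then 1 else 0))

-- Pre_ = exactly the inputs on which A returns: a nonempty all-digit initial state (else
-- int() raises ValueError) and every U/D performed with the cursor inside Python's index
-- range [-n, n) (else state[shift] raises IndexError).
def Pre_unlock_terminal (initial_state : String) (moves : String) : Prop :=
  initial_state.toList ≠ [] ∧
  (initial_state.toList.all pvIsDigit) = true ∧
  pvMovesOk (initial_state.toList.length : Int) moves.toList 0 = true

instance (initial_state : String) (moves : String) : Decidable (Pre_unlock_terminal initial_state moves) := by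
  unfold Pre_unlock_terminal; infer_instance

def pvWitness_unlock_terminal : String × String := ("1", "U")

def Spec_unlock_terminal (initial_state : String) (moves : String) (out : Int) : Prop := out = unlock_terminal_alt initial_state moves
instance (initial_state : String) (moves : String) (out : Int) : Decidable (Spec_unlock_terminal initial_state moves out) := by unfold Spec_unlock_terminal; infer_instance

-- ===== CLAIM (what is proved, stated in full; the proofs are below) =====
def Claim_equal_unlock_terminal : Prop := ∀ (initial_state : String) (moves : String), Dom_unlock_terminal initial_state moves → Pre_unlock_terminal initial_state moves → Spec_unlock_terminal initial_state moves (unlock_terminal initial_state moves)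


-- ===== LEMMAS AND PROOFS =====

lemma pvIntOf_bounds (c : Char) (h : pvIsDigit c = true) :
    0 ≤ pvIntOf c ∧ pvIntOf c < 10 := by
  obtain ⟨h1', h2'⟩ : 48 ≤ c.toNat ∧ c.toNat ≤ 57 := by
    simpa [pvIsDigit] using h
  have hofn := Char.ofNat_toNat c
  interval_cases h : c.toNat <;>
    (rw [← hofn]; decide)

-- net cursor movement of a prefix of moves: #R - #L (proof-side view of pvMovesOk)
def pvBal (ms : List Char) : Int := (ms.count 'R' : Int) - (ms.count 'L' : Int)

-- B's second pass: apply each delta to its digit mod 10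
def pvApply (cs : List Char) (ds : List Int) : List Int :=
  (cs.zip ds).map (fun p => PySem.Int.mod (pvIntOf p.1 + p.2) 10)

lemma mod_pos_cases (n : Nat) (hn : 0 < n) (i : Int) (h1 : -(n:Int) ≤ i) (h2 : i < (n:Int)) :
    PySem.Int.mod i (n:Int) = if 0 ≤ i then i else i + n := by
  rw [PySem.Int.mod_eq_emod_of_pos (by exact_mod_cast hn)]
  split_ifs with h
  · exact Int.emod_eq_of_lt h h2
  · have e : i % (n:Int) = (i + (n:Int) * 1) % (n:Int) := by
      rw [Int.add_mul_emod_self_left]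
    rw [e]
    simp only [mul_one]
    exact Int.emod_eq_of_lt (by omega) (by omega)

lemma pyIdx_of_range (n : Nat) (i : Int) (hn : 0 < n) (h1 : -(n:Int) ≤ i) (h2 : i < (n:Int)) :
    PySem.List.pyIdx? n i = some (PySem.Int.mod i (n:Int)).toNat := by
  rw [mod_pos_cases n hn i h1 h2]
  simp only [PySem.List.pyIdx?]
  split_ifs with ha <;> simp_all <;> omega

lemma pyIdx_natCast (n j : Nat) (h : j < n) :
    PySem.List.pyIdx? n (j:Int) = some j := by
  simp only [PySem.List.pyIdx?]
  split_ifs <;> simp_all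

lemma pySetD_idx {α : Type} (xs : List α) (i : Int) (j : Nat) (v : α)
    (hj : PySem.List.pyIdx? xs.length i = some j) :
    PySem.List.pySetD xs i v = xs.set j v := by
  simp [PySem.List.pySetD, PySem.List.pySet?, hj]

lemma pyGetD_idx {α : Type} (xs : List α) (i : Int) (j : Nat) (d : α)
    (hj : PySem.List.pyIdx? xs.length i = some j) (hlt : j < xs.length) :
    PySem.List.pyGetD xs i d = xs[j] := by
  have h1 : -(xs.length:Int) ≤ i := by
    by_contra h
    simp only [PySem.List.pyIdx?] at hj
    split_ifs at hj <;> omega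
  have h2 : i < (xs.length:Int) := by
    by_contra h
    simp only [PySem.List.pyIdx?] at hj
    split_ifs at hj <;> omega
  by_cases hp : 0 ≤ i
  · have : i.toNat = j := by
      simp only [PySem.List.pyIdx?] at hj; split_ifs at hj <;> simp_all
    rw [PySem.List.pyGetD_eq_getElem (xs := xs) (i := i) (d := d) hp h2]
    simp [this]
  · push_neg at hp
    have hk : 0 < (-i).toNat ∧ (-i).toNat ≤ xs.length := by omega
    have := PySem.List.pyGetD_neg_natCast xs ((-i).toNat) d hk.1 hk.2
    have hi : -(((-i).toNat : Nat) : Int) = i := by omega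
    rw [hi] at this
    rw [this]
    have : xs.length - (-i).toNat = j := by
      simp only [PySem.List.pyIdx?] at hj; split_ifs at hj <;> simp_all
    simp [this]

lemma length_pvApply (cs : List Char) (ds : List Int) :
    (pvApply cs ds).length = min cs.length ds.length := by
  simp [pvApply]

-- one U/D step: mutating B's applied state at Python index i equals bumping the delta at i % n
lemma pvApply_step (cs : List Char) (ds : List Int) (i δ : Int)
    (hlen : ds.length = cs.length)
    (h1 : -(cs.length:Int) ≤ i) (h2 : i < (cs.length:Int)) :
    PySem.List.pySetD (pvApply cs ds) i
      (PySem.Int.mod (PySem.List.pyGetD (pvApply cs ds) i 0 + δ) 10)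
    = pvApply cs (PySem.List.pySetD ds (PySem.Int.mod i (cs.length:Int))
        (PySem.List.pyGetD ds (PySem.Int.mod i (cs.length:Int)) 0 + δ)) := by
  have hn : 0 < cs.length := by omega
  set n := cs.length with hndef
  set j := (PySem.Int.mod i (n:Int)).toNat with hjdef
  have hmodnn : 0 ≤ PySem.Int.mod i (n:Int) := PySem.Int.mod_nonneg i (by exact_mod_cast hn)
  have hmodlt : PySem.Int.mod i (n:Int) < (n:Int) := PySem.Int.mod_lt i (by exact_mod_cast hn)
  have hjc : ((j:Nat):Int) = PySem.Int.mod i (n:Int) := by omega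
  have hjlt : j < n := by omega
  have hidx : PySem.List.pyIdx? n i = some j := pyIdx_of_range n i hn h1 h2
  have hidxa : PySem.List.pyIdx? (pvApply cs ds).length i = some j := by
    rw [length_pvApply, hlen, ← hndef, Nat.min_self]; exact hidx
  have hlenA : (pvApply cs ds).length = n := by rw [length_pvApply, hlen, ← hndef, Nat.min_self]
  rw [pySetD_idx _ i j _ hidxa, pyGetD_idx _ i j _ hidxa (by omega)]
  rw [← hjc]
  have hidxj : PySem.List.pyIdx? ds.length ((j:Nat):Int) = some j := by
    rw [hlen]; exact pyIdx_natCast n j hjlt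
  rw [pySetD_idx ds ((j:Nat):Int) j _ hidxj, pyGetD_idx ds ((j:Nat):Int) j _ hidxj (by omega)]
  have hmod10 : ∀ a : Int, PySem.Int.mod a 10 = a % 10 := fun a =>
    PySem.Int.mod_eq_emod_of_pos (by norm_num)
  apply List.ext_getElem
  · simp [pvApply, hlen]
  · intro k hk1 hk2
    have hkn : k < n := by
      have := hk1; rw [List.length_set, hlenA] at this; exact this
    simp only [List.getElem_set, pvApply, List.getElem_map, List.getElem_zip]
    by_cases hkj : j = k
    · subst hkj
      simp [pvApply, hmod10]
      omega
    · simp [hkj]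

lemma pvBal_cons (m : Char) (l : List Char) :
    pvBal (m :: l) = (if m = 'R' then 1 else 0) - (if m = 'L' then 1 else 0) + pvBal l := by
  simp [pvBal, List.count_cons]
  split_ifs <;> simp_all <;> omega

lemma pvMovesOk_spec (n : Int) (ms : List Char) :
    ∀ (b : Int), pvMovesOk n ms b = true →
    ∀ i < ms.length, (ms[i]! = 'U' ∨ ms[i]! = 'D') →
      -n ≤ b + pvBal (ms.take i) ∧ b + pvBal (ms.take i) < n := by
  induction ms with
  | nil => intro b _ i hi; simp at hi
  | cons m ms ih =>
    intro b hok i hi hud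
    rw [pvMovesOk, Bool.and_eq_true] at hok
    cases i with
    | zero =>
      have hud' : m = 'U' ∨ m = 'D' := by simpa using hud
      have h1 := hok.1
      rw [if_pos hud'] at h1
      have h2 : -n ≤ b ∧ b < n := by simpa using h1
      simp only [List.take_zero, pvBal, List.count_nil]
      constructor <;> (simp; omega)
    | succ i =>
      have := ih _ hok.2 i (by simpa using hi) (by simpa using hud)
      simp only [List.take_succ_cons, pvBal_cons]
      split_ifs at this ⊢ <;> omega

-- the heart of the equivalence: A's simulation over the applied state tracks B's delta table
lemma loop_eq (cs : List Char) (ms : List Char) :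
    ∀ (shift : Int) (ds : List Int), ds.length = cs.length →
    (∀ i, i < ms.length → (ms[i]! = 'U' ∨ ms[i]! = 'D') →
      -(cs.length:Int) ≤ shift + pvBal (ms.take i) ∧
        shift + pvBal (ms.take i) < (cs.length:Int)) →
    pvALoop ms shift (pvApply cs ds) = pvApply cs (pvBLoop (cs.length:Int) ms shift ds) := by
  induction ms with
  | nil => intro shift ds _ _; simp [pvALoop, pvBLoop]
  | cons m ms ih =>
    intro shift ds hlen H
    have Hnext : ∀ i, i < ms.length → (ms[i]! = 'U' ∨ ms[i]! = 'D') →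
        -(cs.length:Int) ≤ shift + pvBal (m :: ms.take i) ∧
          shift + pvBal (m :: ms.take i) < (cs.length:Int) := by
      intro i hi hud
      have := H (i+1) (by simp; omega) (by simpa using hud)
      simpa [List.take_succ_cons] using this
    by_cases hU : m = 'U'
    · subst hU
      have h0 := H 0 (by simp) (Or.inl (by simp))
      simp only [pvBal, List.take_zero, List.count_nil] at h0
      simp only [CharP.cast_eq_zero, Int.sub_zero, Int.add_zero, Nat.cast_ofNat, Int.zero_sub, add_zero, sub_zero] at h0
      have h0' : -(cs.length:Int) ≤ shift ∧ shift < (cs.length:Int) := by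
        constructor <;> omega
      rw [pvALoop, pvBLoop, if_pos rfl, if_neg (by decide), if_neg (by decide), if_pos rfl]
      rw [pvApply_step cs ds shift 1 hlen h0'.1 h0'.2]
      apply ih
      · simp [hlen]
      · intro i hi hud
        have := Hnext i hi hud
        simpa [pvBal_cons] using this
    · by_cases hD : m = 'D'
      · subst hD
        have h0 := H 0 (by simp) (Or.inr (by simp))
        simp only [pvBal, List.take_zero, List.count_nil, CharP.cast_eq_zero, Int.zero_sub, add_zero, sub_zero, Int.add_zero] at h0
        have h0' : -(cs.length:Int) ≤ shift ∧ shift < (cs.length:Int) := by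
          constructor <;> omega
        rw [pvALoop, pvBLoop, if_neg (by decide), if_pos rfl, if_neg (by decide), if_neg (by decide), if_pos rfl]
        simp only [sub_eq_add_neg]
        rw [pvApply_step cs ds shift (-1) hlen h0'.1 h0'.2]
        apply ih
        · simp [hlen]
        · intro i hi hud
          have := Hnext i hi hud
          simpa [pvBal_cons] using this
      · by_cases hL : m = 'L'
        · subst hL
          rw [pvALoop, pvBLoop, if_neg (by decide), if_neg (by decide), if_pos rfl, if_pos rfl]
          apply ih _ ds hlen
          intro i hi hud
          have := Hnext i hi hud
          simp only [pvBal_cons] at this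
          constructor <;> (have h := this; simp at h ⊢; omega)
        · by_cases hR : m = 'R'
          · subst hR
            rw [pvALoop, pvBLoop, if_neg (by decide), if_neg (by decide), if_neg (by decide), if_pos rfl, if_pos rfl]
            apply ih _ ds hlen
            intro i hi hud
            have := Hnext i hi hud
            simp only [pvBal_cons] at this
            constructor <;> (have h := this; simp at h ⊢; omega)
          · rw [pvALoop, pvBLoop, if_neg hU, if_neg hD, if_neg hL, if_neg hR, if_neg hL, if_neg hR, if_neg hU, if_neg hD]
            apply ih _ ds hlen
            intro i hi hud
            have := Hnext i hi hud
            simp only [pvBal_cons, if_neg hL, if_neg hR] at this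
            simpa using this

-- with zero deltas, B's apply pass returns exactly A's initial digit list
lemma pvApply_replicate (cs : List Char) (hd : ∀ c ∈ cs, pvIsDigit c = true) :
    pvApply cs (List.replicate cs.length 0) = cs.map pvIntOf := by
  apply List.ext_getElem
  · simp [pvApply]
  · intro k hk1 hk2
    have hklen : k < cs.length := by simpa using hk2
    simp only [pvApply, List.getElem_map, List.getElem_zip, List.getElem_replicate]
    have hb := pvIntOf_bounds (cs[k]'hklen) (hd _ (List.getElem_mem hklen))
    rw [PySem.Int.mod_eq_emod_of_pos (by norm_num)]
    omega

-- ===== VERDICT (by name: the statement is the Claim_ definition above) =====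
theorem unlock_terminal_spec : Claim_equal_unlock_terminal := by
  intro s m _ hpre
  obtain ⟨hne, hdig, hsh⟩ := hpre
  rw [List.all_eq_true] at hdig
  show unlock_terminal s m = unlock_terminal_alt s m
  have H0 : ∀ i, i < m.toList.length → (m.toList[i]! = 'U' ∨ m.toList[i]! = 'D') →
      -(s.toList.length:Int) ≤ 0 + pvBal (m.toList.take i) ∧
        0 + pvBal (m.toList.take i) < (s.toList.length:Int) := by
    intro i hi hud
    exact pvMovesOk_spec (s.toList.length:Int) m.toList 0 hsh i hi hud
  have key := loop_eq s.toList m.toList 0 (List.replicate s.toList.length 0) (by simp) H0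
  rw [pvApply_replicate s.toList hdig] at key
  unfold unlock_terminal
  rw [key]
  rfl
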